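-- pv_equiv track=rewrite | github.com/DieterJoubert/advent_of_code | 2023/day_07.py | get_joker_hand_counter
-- ===== SOURCE A (Python) =====
-- def get_joker_hand_counter(hand):
-- 	num_jokers = 0
-- 	counter = {}
--
-- 	for c in hand:
-- 		if c == 'J':
-- 			num_jokers += 1
-- 		elif c not in counter:
-- 			counter[c] = 1
-- 		else:
-- 			counter[c] += 1
--
-- 	if not counter: #edge case where only Jokers in hand
-- 		return {'J': 5}
--
-- 	counter_items = sorted(list(counter.items()), key=lambda x: x[1])
-- 	max_item = counter_items[-1]
--
-- 	for _ in range(num_jokers):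
-- 		counter[max_item[0]] += 1
--
-- 	return counter
-- ===== SOURCE B (Python) =====
-- def get_joker_hand_counter(hand):
--     counter = {}
--     num_jokers = 0
--     for c in hand:
--         if c == 'J':
--             num_jokers += 1
--         else:
--             counter[c] = counter.get(c, 0) + 1
--
--     if not counter:  # all jokers
--         return {'J': 5}
--
--     best = None
--     for k, v in counter.items():
--         if best is None or v >= best[1]:
--             best = (k, v)
--
--     counter[best[0]] = best[1] + num_jokers
--     return counter
-- ===== Notes on version B (the rewrite author's own statement) =====
-- stated objective: simpler
-- what changed: B picks the most frequent rank with one linear >=-scan over the counter (ties resolve to the last-inserted key, exactly like A's stable sort + [-1]) instead of sorting the items, and adds the joker count in a single assignment instead of A's one-increment-per-joker loop.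
import Mathlib
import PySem

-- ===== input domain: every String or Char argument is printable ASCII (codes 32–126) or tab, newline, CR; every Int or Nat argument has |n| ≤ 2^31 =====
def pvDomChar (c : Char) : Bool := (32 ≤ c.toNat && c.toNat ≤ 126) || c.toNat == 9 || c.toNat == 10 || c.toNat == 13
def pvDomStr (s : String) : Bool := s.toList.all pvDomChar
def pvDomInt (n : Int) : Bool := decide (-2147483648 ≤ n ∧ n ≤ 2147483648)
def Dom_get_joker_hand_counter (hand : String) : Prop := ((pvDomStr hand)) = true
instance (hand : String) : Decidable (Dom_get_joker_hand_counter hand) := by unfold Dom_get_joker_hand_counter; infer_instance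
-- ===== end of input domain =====

-- B replaces A's sort-the-items-and-take-the-last selection of the most frequent rank by a single
-- linear >=-scan over the dict, and A's one-increment-per-joker loop by a single addition (simpler).

-- ===== PORT A =====
-- A's counting loop: state = (num_jokers, counter)
def pvAStep (s : Int × PySem.Dict String Int) (c : Char) : Int × PySem.Dict String Int :=
  if c = 'J' then (s.1 + 1, s.2)
  else if s.2.contains (String.singleton c) = false then (s.1, s.2.insert (String.singleton c) 1)
  else (s.1, s.2.modify (String.singleton c) 0 (· + 1))

def get_joker_hand_counter (hand : String) : List (String × Int) :=
  let st := hand.toList.foldl pvAStep (0, PySem.Dict.empty)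
  let num_jokers := st.1
  let counter := st.2
  if counter.items = [] then [("J", 5)]   -- edge case where only Jokers in hand
  else
    let counter_items := PySem.List.sorted counter.items (fun x => x.2) false
    match PySem.List.pyGet? counter_items (-1) with
    | none => []   -- unreachable: counter_items[-1] raises only on an empty list
    | some max_item =>
        ((PySem.List.pyRange 0 num_jokers 1).foldl
          (fun d _ => d.modify max_item.1 0 (· + 1)) counter).items

-- ===== PORT B =====
-- B's counting loop: counter[c] = counter.get(c, 0) + 1
def pvBStep (s : Int × PySem.Dict String Int) (c : Char) : Int × PySem.Dict String Int :=
  if c = 'J' then (s.1 + 1, s.2)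
  else (s.1, s.2.insert (String.singleton c) (s.2.getD (String.singleton c) 0 + 1))

-- B's linear max scan: 'if best is None or v >= best[1]: best = (k, v)'
def pvScan (b : Option (String × Int)) (p : String × Int) : Option (String × Int) :=
  match b with
  | none => some p
  | some q => if q.2 ≤ p.2 then some p else some q

def get_joker_hand_counter_alt (hand : String) : List (String × Int) :=
  let st := hand.toList.foldl pvBStep (0, PySem.Dict.empty)
  let num_jokers := st.1
  let counter := st.2
  if counter.items = [] then [("J", 5)]   -- all jokers
  else
    match counter.items.foldl pvScan none with
    | none => []   -- unreachable: counter is non-empty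
    | some best => (counter.insert best.1 (best.2 + num_jokers)).items

-- ===== PRECONDITION & SPEC =====
def Spec_get_joker_hand_counter (hand : String) (out : List (String × Int)) : Prop := out = get_joker_hand_counter_alt hand
instance (hand : String) (out : List (String × Int)) : Decidable (Spec_get_joker_hand_counter hand out) := by unfold Spec_get_joker_hand_counter; infer_instance

-- ===== CLAIM (what is proved, stated in full; the proofs are below) =====
def Claim_equal_get_joker_hand_counter : Prop := ∀ (hand : String), Dom_get_joker_hand_counter hand → Spec_get_joker_hand_counter hand (get_joker_hand_counter hand)

-- ===== LEMMAS AND PROOFS =====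

-- The two counting steps agree.
lemma pvStep_eq : pvAStep = pvBStep := by
  funext s c
  unfold pvAStep pvBStep
  split_ifs with h1 h2
  · rfl
  · rw [PySem.Dict.getD_of_not_contains _ _ h2]; norm_num
  · rfl

-- keys stay Nodup through B's counting loop
lemma pvNodupKeys (l : List Char) (n : Int) (d : PySem.Dict String Int) (h : d.keys.Nodup) :
    ((l.foldl pvBStep (n, d)).2).keys.Nodup := by
  induction l generalizing n d with
  | nil => exact h
  | cons c l ih =>
      rw [List.foldl_cons]
      by_cases hc : c = 'J'
      · rw [show pvBStep (n, d) c = (n + 1, d) from by simp [pvBStep, hc]]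
        exact ih _ _ h
      · rw [show pvBStep (n, d) c
            = (n, d.insert (String.singleton c) (d.getD (String.singleton c) 0 + 1)) from by
          simp [pvBStep, hc]]
        exact ih _ _ (PySem.Dict.nodup_keys_insert _ _ _ h)

-- the joker count is a Nat count, hence nonnegative
lemma pvFstEq (l : List Char) (n : Int) (d : PySem.Dict String Int) :
    (l.foldl pvBStep (n, d)).1 = n + (l.countP (· = 'J') : Int) := by
  induction l generalizing n d with
  | nil => simp
  | cons c l ih =>
      rw [List.foldl_cons, List.countP_cons]
      by_cases h : c = 'J'
      · rw [show pvBStep (n, d) c = (n + 1, d) from by simp [pvBStep, h]]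
        rw [ih]
        simp [h]
        ring
      · rw [show pvBStep (n, d) c
            = (n, d.insert (String.singleton c) (d.getD (String.singleton c) 0 + 1)) from by
          simp [pvBStep, h]]
        rw [ih]
        simp [h]

-- inserting a present binding back is the identity
lemma pvInsertSelf (d : PySem.Dict String Int) (k : String) (v : Int)
    (hnd : d.keys.Nodup) (hm : (k, v) ∈ d.items) : d.insert k v = d := by
  apply PySem.Dict.ext
  have hc : d.contains k = true :=
    (PySem.Dict.contains_iff_mem_keys d k).mpr (PySem.Dict.mem_keys_of_mem_items d hm)
  rw [PySem.Dict.items_insert_of_contains d v hc]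
  have hget := PySem.Dict.get?_of_mem_items d hm hnd
  conv_rhs => rw [← List.map_id d.items]
  apply List.map_congr_left
  rintro ⟨p1, p2⟩ hp
  by_cases hpk : p1 = k
  · have h2 : d.get? p1 = some p2 := PySem.Dict.get?_of_mem_items d hp hnd
    rw [hpk, hget] at h2
    simp [hpk, Option.some.inj h2]
  · simp [hpk]

-- A's joker loop = a single insert
lemma pvIter (n : Nat) (d : PySem.Dict String Int) (k : String)
    (hnd : d.keys.Nodup) (hc : d.contains k = true) :
    (PySem.List.pyRange 0 (n : Int) 1).foldl (fun d _ => d.modify k 0 (· + 1)) d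
      = d.insert k (d.getD k 0 + n) := by
  induction n with
  | zero =>
      rw [show ((0 : Nat) : Int) = 0 by rfl, PySem.List.pyRange_one_eq_nil le_rfl]
      have hsome : (d.get? k).isSome = true := by
        rw [← PySem.Dict.contains_eq_isSome_get?]; exact hc
      obtain ⟨v, hv⟩ := Option.isSome_iff_exists.mp hsome
      have hm := PySem.Dict.mem_items_of_get?_eq_some d hv
      have hgd : d.getD k 0 = v := PySem.Dict.getD_of_get?_eq_some d 0 hv
      simp only [List.foldl_nil, add_zero, hgd]
      exact (pvInsertSelf d k v hnd hm).symm
  | succ m ih =>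
      rw [show ((m + 1 : Nat) : Int) = (m : Int) + 1 by push_cast; ring,
        PySem.List.pyRange_one_succ_right (by positivity), List.foldl_append]
      simp only [List.foldl_cons, List.foldl_nil, ih]
      show (d.insert k (d.getD k 0 + ↑m)).modify k 0 (· + 1) = _
      unfold PySem.Dict.modify
      rw [PySem.Dict.getD_insert_self, PySem.Dict.insert_insert_self]
      push_cast
      ring_nf

-- xs[-1] on a non-empty list is its last element
lemma pvPyGetNeg1 {α : Type} (l : List α) (h : l ≠ []) :
    PySem.List.pyGet? l (-1) = l.getLast? := by
  have hlen : 1 ≤ l.length := List.length_pos_iff.mpr h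
  simp only [PySem.List.pyGet?, PySem.List.pyIdx?]
  rw [if_neg (by omega), if_pos (by omega : -(l.length : Int) ≤ -1)]
  simp only [Option.bind_some, List.getLast?_eq_getElem?]
  norm_num

-- insertBy never returns the empty list
lemma pvInsertByNe {α : Type} (bf : α → α → Bool) (x : α) (l : List α) :
    PySem.List.insertBy bf x l ≠ [] := by
  cases l with
  | nil => simp [PySem.List.insertBy]
  | cons y ys =>
      simp only [PySem.List.insertBy]
      split_ifs <;> simp

-- last of the stable insertion of x into a key-sorted list = one >=-scan step
lemma pvInsLast (ys : List (String × Int)) (x : String × Int)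
    (h : ys.Pairwise (fun a b => a.2 ≤ b.2)) :
    (PySem.List.insertBy (fun a b => decide (a.2 < b.2)) x ys).getLast? = pvScan ys.getLast? x := by
  induction ys with
  | nil => rfl
  | cons y ys ih =>
      rw [List.pairwise_cons] at h
      simp only [PySem.List.insertBy]
      split_ifs with hb
      · -- x stays in front: the last element keeps a strictly larger key than x
        simp only [decide_eq_true_eq] at hb
        have hne : (y :: ys) ≠ [] := by simp
        obtain ⟨m, hm⟩ := Option.isSome_iff_exists.mp (List.getLast?_isSome.mpr hne)
        have hym : y.2 ≤ m.2 := by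
          rcases List.mem_cons.mp (List.mem_of_getLast? hm) with hmy | hmys
          · rw [← hmy]
          · exact h.1 m hmys
        rw [List.getLast?_cons_cons, hm]
        simp only [pvScan]
        rw [if_neg (by omega)]
      · cases ys with
        | nil =>
            simp only [decide_eq_true_eq, not_lt] at hb
            simp [PySem.List.insertBy, pvScan, hb]
        | cons z zs =>
            obtain ⟨a, t, ht⟩ : ∃ a t, PySem.List.insertBy
                (fun a b => decide (a.2 < b.2)) x (z :: zs) = a :: t := by
              rcases hl : PySem.List.insertBy (fun a b => decide (a.2 < b.2)) x (z :: zs) with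
                _ | ⟨a, t⟩
              · exact absurd hl (pvInsertByNe _ _ _)
              · exact ⟨a, t, hl⟩
            rw [ht, List.getLast?_cons_cons, ← ht, ih h.2, List.getLast?_cons_cons]

-- last of the stable sort (key = count) = B's >=-scan
lemma pvSortLast (l : List (String × Int)) :
    (PySem.List.sorted l (fun x => x.2) false).getLast? = l.foldl pvScan none := by
  induction l using List.reverseRecOn with
  | nil => rfl
  | append_singleton l x ih =>
      rw [List.foldl_append, List.foldl_cons, List.foldl_nil, ← ih,
        PySem.List.sorted_eq_foldl_insertBy, List.foldl_append, List.foldl_cons, List.foldl_nil,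
        ← PySem.List.sorted_eq_foldl_insertBy]
      exact pvInsLast _ x (PySem.List.sorted_pairwise l (fun x => x.2))

-- ===== VERDICT (by name: the statement is the Claim_ definition above) =====
theorem get_joker_hand_counter_spec : Claim_equal_get_joker_hand_counter := by
  unfold Claim_equal_get_joker_hand_counter Spec_get_joker_hand_counter
  intro hand _
  unfold get_joker_hand_counter get_joker_hand_counter_alt
  rw [pvStep_eq]
  have hnd : ((hand.toList.foldl pvBStep (0, PySem.Dict.empty)).2).keys.Nodup :=
    pvNodupKeys _ _ _ (by simp [PySem.Dict.keys_empty])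
  have hnj : 0 ≤ (hand.toList.foldl pvBStep (0, PySem.Dict.empty)).1 := by
    rw [pvFstEq]; positivity
  set st := hand.toList.foldl pvBStep (0, PySem.Dict.empty) with hst
  by_cases hemp : st.2.items = []
  · simp [hemp]
  · simp only [if_neg hemp]
    have hcne : PySem.List.sorted st.2.items (fun x => x.2) false ≠ [] := by
      simpa [PySem.List.sorted_eq_nil_iff] using hemp
    obtain ⟨m, hm⟩ := Option.isSome_iff_exists.mp (List.getLast?_isSome.mpr hcne)
    have hscan : st.2.items.foldl pvScan none = some m := by
      rw [← pvSortLast, hm]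
    rw [pvPyGetNeg1 _ hcne, hm, hscan]
    dsimp only
    have hmem : m ∈ st.2.items := by
      have := List.mem_of_getLast? hm
      exact (PySem.List.mem_sorted _ _ _ _).mp this
    have hget : st.2.getD m.1 0 = m.2 :=
      PySem.Dict.getD_of_get?_eq_some _ 0
        (PySem.Dict.get?_of_mem_items _ (by simpa using hmem) hnd)
    have hcont : st.2.contains m.1 = true :=
      (PySem.Dict.contains_iff_mem_keys _ _).mpr (PySem.Dict.mem_keys_of_mem_items _ hmem)
    have hcast : st.1 = ((st.1.toNat : Nat) : Int) := (Int.toNat_of_nonneg hnj).symm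
    rw [hcast, pvIter st.1.toNat st.2 m.1 hnd hcont, hget]
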